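-- pv_equiv track=rewrite | github.com/stedevine/advent2020 | day16/problem16.py | get_tickets
-- ===== SOURCE A (Python) =====
-- def get_tickets(lines):
--     tickets = []
--     ignore = True
--     for line in lines:
--         if ignore == False:
--             tickets.append(line)
--         if line == 'nearby tickets:':
--             ignore = False
--
--     return tickets
-- ===== SOURCE B (Python) =====
-- def get_tickets(lines):
--     lines = list(lines)
--     if 'nearby tickets:' in lines:
--         return lines[lines.index('nearby tickets:') + 1:]
--     return []
-- ===== Notes on version B (the rewrite author's own statement) =====
-- stated objective: simpler
-- what changed: Replaces the flag-based single pass that appends line by line with locating the first marker index and returning the slice after it (empty result when the marker is absent).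
import Mathlib
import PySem

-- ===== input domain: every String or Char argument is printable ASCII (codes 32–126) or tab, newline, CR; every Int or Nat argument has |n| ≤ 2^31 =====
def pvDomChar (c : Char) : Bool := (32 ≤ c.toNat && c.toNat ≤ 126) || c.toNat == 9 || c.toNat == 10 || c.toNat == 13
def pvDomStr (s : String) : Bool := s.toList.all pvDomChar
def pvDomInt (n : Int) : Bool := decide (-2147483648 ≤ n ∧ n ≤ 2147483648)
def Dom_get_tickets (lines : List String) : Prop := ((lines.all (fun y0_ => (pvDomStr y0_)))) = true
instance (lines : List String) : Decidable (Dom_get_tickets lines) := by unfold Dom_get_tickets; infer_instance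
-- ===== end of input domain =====

-- B replaces A's flag-based single pass with locate-the-first-marker-then-slice (simpler decomposition).


-- ===== PORT A =====
-- the for-loop over `lines` with state (tickets, ignore)
def get_tickets_loop : List String → List String → Bool → List String
  | [], tickets, _ => tickets
  | line :: rest, tickets, ignore =>
      let tickets' := if ignore == false then tickets ++ [line] else tickets
      let ignore' := if line == "nearby tickets:" then false else ignore
      get_tickets_loop rest tickets' ignore'

def get_tickets (lines : List String) : List String :=
  get_tickets_loop lines [] true

-- ===== PORT B =====
def get_tickets_alt (lines : List String) : List String :=
  match PySem.List.index? lines "nearby tickets:" with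
  | some i => PySem.List.slice lines (some ((i + 1 : Nat) : Int)) none
  | none => []

-- ===== PRECONDITION & SPEC =====
def Spec_get_tickets (lines : List String) (out : List String) : Prop := out = get_tickets_alt lines
instance (lines : List String) (out : List String) : Decidable (Spec_get_tickets lines out) := by unfold Spec_get_tickets; infer_instance

-- ===== CLAIM (what is proved, stated in full; the proofs are below) =====
def Claim_equal_get_tickets : Prop := ∀ (lines : List String), Dom_get_tickets lines → Spec_get_tickets lines (get_tickets lines)

-- ===== LEMMAS AND PROOFS =====
-- once ignore is false, every remaining line is appended
theorem get_tickets_loop_false (rest : List String) : ∀ (t : List String),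
    get_tickets_loop rest t false = t ++ rest := by
  induction rest with
  | nil => intro t; simp [get_tickets_loop]
  | cons l r ih =>
      intro t
      simp only [get_tickets_loop]
      by_cases h : l == "nearby tickets:" <;> simp [h, ih]

theorem get_tickets_loop_true (lines : List String) : ∀ (t : List String),
    get_tickets_loop lines t true = t ++ get_tickets_alt lines := by
  induction lines with
  | nil => intro t; simp [get_tickets_loop, get_tickets_alt, PySem.List.index?]
  | cons l r ih =>
      intro t
      have halt : ∀ (x : String) (xs : List String), x ≠ "nearby tickets:" →
          get_tickets_alt (x :: xs) = get_tickets_alt xs := by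
        intro x xs hx
        rw [get_tickets_alt, get_tickets_alt,
          PySem.List.index?_cons_of_ne xs (fun he => hx he)]
        cases hi : PySem.List.index? xs "nearby tickets:" with
        | none => simp
        | some i =>
            simp only [Option.map_some]
            rw [PySem.List.slice_from_natCast, PySem.List.slice_from_natCast]
            simp [List.drop_succ_cons]
      by_cases h : l = "nearby tickets:"
      · subst h
        simp only [get_tickets_loop, beq_self_eq_true, if_true,
          if_neg (by decide : ¬ ((true : Bool) == false) = true)]
        rw [get_tickets_loop_false]
        have : get_tickets_alt ("nearby tickets:" :: r) = r := by
          rw [get_tickets_alt, PySem.List.index?_cons_self]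
          show PySem.List.slice ("nearby tickets:" :: r) (some ((0 + 1 : Nat) : Int)) = r
          rw [PySem.List.slice_from_natCast]
          simp
        rw [this]
      · have hb : (l == "nearby tickets:") = false := by simpa using h
        simp only [get_tickets_loop, hb, Bool.false_eq_true, if_false,
          if_neg (by decide : ¬ ((true : Bool) == false) = true)]
        rw [ih, halt l r h]

-- ===== VERDICT (by name: the statement is the Claim_ definition above) =====
theorem get_tickets_spec : Claim_equal_get_tickets := by
  intro lines _
  unfold Spec_get_tickets get_tickets
  simpa using get_tickets_loop_true lines []
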